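-- pv_equiv track=rewrite | github.com/JessePires/LogicaDigital | relogio/relogio.py | ff_jk
-- ===== SOURCE A (Python) =====
-- def p_nand_2(a, b):
--     return int(not(a and b))
--
-- def p_nand_3(a, b, c):
--     return int(not(a and b and c))
--
-- def p_not(a):
--     return int(not(a))
--
-- def ff_jk(ck=1, j=1, k=1, qa=0):
--     qa1, qa2 = qa, p_not(qa)
--     qf1, qf2 = qa1, qa2
--     while True:
--         s1 = p_nand_3(j, ck, qa2)
--         s2 = p_nand_3(k, ck, qa1)
--         qf1 = p_nand_2(s1, qf2)
--         qf2 = p_nand_2(s2, qf1)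
--         if qf1 != qf2:
--             return qf1
-- ===== SOURCE B (Python) =====
-- def ff_jk(ck=1, j=1, k=1, qa=0):
--     # Closed-form JK flip-flop truth table (same settled value as the NAND loop).
--     if not ck:
--         return int(bool(qa))  # hold
--     if j and k:
--         return int(not qa)    # toggle
--     if j:
--         return 1              # set
--     if k:
--         return 0              # reset
--     return int(bool(qa))      # hold
-- ===== Notes on version B (the rewrite author's own statement) =====
-- stated objective: simpler
-- what changed: Replaced the iterative NAND-gate settling loop with a direct truth-table return (hold/toggle/set/reset chosen by the truthiness of ck, j, k).
import Mathlib
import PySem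

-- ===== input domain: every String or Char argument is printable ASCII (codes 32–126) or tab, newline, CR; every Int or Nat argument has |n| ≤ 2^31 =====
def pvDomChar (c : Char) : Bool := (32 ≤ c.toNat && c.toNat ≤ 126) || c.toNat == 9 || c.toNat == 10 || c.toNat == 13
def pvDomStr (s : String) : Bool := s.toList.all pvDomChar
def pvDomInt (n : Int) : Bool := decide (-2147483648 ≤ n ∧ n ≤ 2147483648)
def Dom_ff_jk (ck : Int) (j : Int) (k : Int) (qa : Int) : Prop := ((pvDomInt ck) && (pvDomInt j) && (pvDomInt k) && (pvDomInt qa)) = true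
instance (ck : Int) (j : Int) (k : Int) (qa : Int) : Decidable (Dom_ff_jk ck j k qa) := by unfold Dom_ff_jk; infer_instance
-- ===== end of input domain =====

-- B replaces A's NAND-gate settling loop with a direct truth-table return (simpler).


-- ===== PORT A =====
-- int(not (a and b)): 0 if both truthy, else 1
def p_nand_2 (a b : Int) : Int := if a ≠ 0 ∧ b ≠ 0 then 0 else 1
def p_nand_3 (a b c : Int) : Int := if a ≠ 0 ∧ b ≠ 0 ∧ c ≠ 0 then 0 else 1
def p_not (a : Int) : Int := if a ≠ 0 then 0 else 1

-- the 'while True' loop, with fuel; s1 and s2 are loop-invariant in A, as they only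
-- depend on the parameters.  Fuel 2 suffices: on the second pass qf1' = not qf2 and
-- qf2' = not qf1', which always differ, so the 0-fuel branch is unreachable (A always
-- returns within two iterations).
def ffLoop : Nat → Int → Int → Int → Int
  | 0, _, _, qf1 => qf1   -- unreachable
  | n + 1, s1, s2, qf2 =>
      let qf1' := p_nand_2 s1 qf2
      let qf2' := p_nand_2 s2 qf1'
      if qf1' ≠ qf2' then qf1' else ffLoop n s1 s2 qf2'

def ff_jk (ck : Int) (j : Int) (k : Int) (qa : Int) : Int :=
  let qa1 := qa
  let qa2 := p_not qa
  let s1 := p_nand_3 j ck qa2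
  let s2 := p_nand_3 k ck qa1
  ffLoop 2 s1 s2 qa2

-- ===== PORT B =====
def ff_jk_alt (ck : Int) (j : Int) (k : Int) (qa : Int) : Int :=
  if ck = 0 then (if qa = 0 then 0 else 1)
  else if j ≠ 0 ∧ k ≠ 0 then (if qa = 0 then 1 else 0)
  else if j ≠ 0 then 1
  else if k ≠ 0 then 0
  else (if qa = 0 then 0 else 1)

-- ===== PRECONDITION & SPEC =====
def Spec_ff_jk (ck : Int) (j : Int) (k : Int) (qa : Int) (out : Int) : Prop := out = ff_jk_alt ck j k qa
instance (ck : Int) (j : Int) (k : Int) (qa : Int) (out : Int) : Decidable (Spec_ff_jk ck j k qa out) := by unfold Spec_ff_jk; infer_instance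

-- ===== CLAIM (what is proved, stated in full; the proofs are below) =====
def Claim_equal_ff_jk : Prop := ∀ (ck : Int) (j : Int) (k : Int) (qa : Int), Dom_ff_jk ck j k qa → Spec_ff_jk ck j k qa (ff_jk ck j k qa)

-- ===== LEMMAS AND PROOFS =====

-- ===== VERDICT (by name: the statement is the Claim_ definition above) =====
theorem ff_jk_spec : Claim_equal_ff_jk := by
  intro ck j k qa _
  unfold Spec_ff_jk ff_jk ff_jk_alt ffLoop p_nand_2 p_nand_3 p_not
  by_cases hc : ck = 0 <;> by_cases hj : j = 0 <;> by_cases hk : k = 0 <;> by_cases hq : qa = 0 <;>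
    simp [hc, hj, hk, hq] <;> decide
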